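-- pv_equiv track=rewrite | github.com/ksinha49/scout | backend/open_webui/utils/plugin.py | replace_imports
-- ===== SOURCE A (Python) =====
-- def replace_imports(content):
--     """
--     Replace the import paths in the content.
--     """
--     replacements = {
--         "from utils": "from open_webui.utils",
--         "from apps": "from open_webui",
--         "from main": "from open_webui.main",
--         "from config": "from open_webui.config",
--     }
--
--     for old, new in replacements.items():
--         content = content.replace(old, new)
--
--     return content
-- ===== SOURCE B (Python) =====
-- def replace_imports(content):
--     """
--     Replace the import paths in the content.
--     """
--     replacements = (
--         ("from utils", "from open_webui.utils"),
--         ("from apps", "from open_webui"),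
--         ("from main", "from open_webui.main"),
--         ("from config", "from open_webui.config"),
--     )
--
--     out = []
--     i = 0
--     n = len(content)
--     while i < n:
--         for old, new in replacements:
--             if content.startswith(old, i):
--                 out.append(new)
--                 i += len(old)
--                 break
--         else:
--             out.append(content[i])
--             i += 1
--     return "".join(out)
-- ===== Notes on version B (the rewrite author's own statement) =====
-- stated objective: alternative
-- what changed: B makes a single left-to-right scan over the content, matching the four keys at each position and copying unmatched characters, instead of A's four sequential full-string .replace passes that build three intermediate strings.
import Mathlib
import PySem

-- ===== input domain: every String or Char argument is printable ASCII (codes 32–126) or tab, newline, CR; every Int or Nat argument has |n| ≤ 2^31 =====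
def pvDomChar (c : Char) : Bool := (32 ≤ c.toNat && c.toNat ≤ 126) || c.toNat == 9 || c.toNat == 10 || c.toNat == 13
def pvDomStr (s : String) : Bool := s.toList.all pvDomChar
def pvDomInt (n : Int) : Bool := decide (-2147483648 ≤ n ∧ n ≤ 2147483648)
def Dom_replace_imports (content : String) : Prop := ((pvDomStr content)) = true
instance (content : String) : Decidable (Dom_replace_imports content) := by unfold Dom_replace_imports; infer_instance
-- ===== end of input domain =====

-- B replaces A's four sequential full-string .replace passes by ONE left-to-right scan that
-- matches the four keys at each position and copies unmatched characters (objective: alternative).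

-- ===== PORT A =====
-- literal transliteration of A: a dict of replacements, then one `content.replace(old, new)` per item
def replace_imports (content : String) : String :=
  let replacements : List (String × String) :=
    [("from utils", "from open_webui.utils"),
     ("from apps", "from open_webui"),
     ("from main", "from open_webui.main"),
     ("from config", "from open_webui.config")]
  replacements.foldl (fun c p => PySem.Str.replace c p.1 p.2) content

-- ===== PORT B =====
-- the four (old, new) pairs of Source B, as character lists (the scan works character-wise)
def pvK1 : List Char := "from utils".toList
def pvR1 : List Char := "from open_webui.utils".toList
def pvK2 : List Char := "from apps".toList
def pvR2 : List Char := "from open_webui".toList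
def pvK3 : List Char := "from main".toList
def pvR3 : List Char := "from open_webui.main".toList
def pvK4 : List Char := "from config".toList
def pvR4 : List Char := "from open_webui.config".toList

-- Source B's while loop: at each position try the four keys in order (content.startswith(old, i));
-- on a match emit `new` and skip len(old) characters, otherwise emit the character and advance
def pvScan : List Char → List Char
  | [] => []
  | c :: t =>
    if pvK1.isPrefixOf (c :: t) then pvR1 ++ pvScan (List.drop 9 t)
    else if pvK2.isPrefixOf (c :: t) then pvR2 ++ pvScan (List.drop 8 t)
    else if pvK3.isPrefixOf (c :: t) then pvR3 ++ pvScan (List.drop 8 t)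
    else if pvK4.isPrefixOf (c :: t) then pvR4 ++ pvScan (List.drop 10 t)
    else c :: pvScan t
  termination_by l => l.length
  decreasing_by all_goals (simp [List.length_drop]; try omega)

def replace_imports_alt (content : String) : String :=
  String.ofList (pvScan content.toList)

-- ===== PRECONDITION & SPEC =====
def Spec_replace_imports (content : String) (out : String) : Prop := out = replace_imports_alt content
instance (content : String) (out : String) : Decidable (Spec_replace_imports content out) := by unfold Spec_replace_imports; infer_instance

-- ===== CLAIM (what is proved, stated in full; the proofs are below) =====
def Claim_equal_replace_imports : Prop := ∀ (content : String), Dom_replace_imports content → Spec_replace_imports content (replace_imports content)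

-- ===== LEMMAS AND PROOFS =====

-- fuel-free restatement of PySem.Chars.replace (for a non-empty `old`)
def pvRep (old new : List Char) : List Char → List Char
  | [] => []
  | c :: t =>
    if old.isPrefixOf (c :: t) then new ++ pvRep old new (List.drop (old.length - 1) t)
    else c :: pvRep old new t
  termination_by l => l.length
  decreasing_by all_goals (simp [List.length_drop]; try omega)

theorem pvGo_eq_pvRep (old new : List Char) (hold : old ≠ []) :
    ∀ fuel l acc, l.length ≤ fuel →
      PySem.Chars.replace.go old new fuel l acc = acc.reverse ++ pvRep old new l := by
  intro fuel
  induction fuel with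
  | zero =>
      intro l acc hl
      have : l = [] := List.eq_nil_of_length_eq_zero (Nat.le_zero.mp hl)
      subst this
      simp [PySem.Chars.replace.go, pvRep]
  | succ n ih =>
      intro l acc hl
      match l with
      | [] => simp [PySem.Chars.replace.go, pvRep]
      | c :: t =>
        by_cases hp : old.isPrefixOf (c :: t)
        · obtain ⟨m, hm⟩ : ∃ m, old.length = m + 1 :=
            ⟨old.length - 1, by cases old <;> simp_all⟩
          have hlen : (List.drop old.length (c :: t)).length ≤ n := by
            simp [List.length_drop] at *
            omega
          simp only [PySem.Chars.replace.go, hp, if_true]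
          rw [ih _ _ hlen]
          rw [pvRep]
          simp [hp, hm, List.drop_succ_cons]
        · have hlen : t.length ≤ n := by simp at hl; omega
          simp only [PySem.Chars.replace.go, hp]
          rw [ih _ _ hlen]
          rw [pvRep]
          simp [hp]

theorem pvReplace_eq_pvRep (old new l : List Char) (hold : old ≠ []) :
    PySem.Chars.replace l old new = pvRep old new l := by
  have : old.isEmpty = false := by cases old <;> simp_all
  simp [PySem.Chars.replace, this]
  simpa using pvGo_eq_pvRep old new hold l.length l [] (le_refl _)

theorem pvRep_nil (old new : List Char) : pvRep old new [] = [] := by simp [pvRep]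

theorem pvRep_match (old new l : List Char) (hold : old ≠ [])
    (hp : old.isPrefixOf l = true) :
    pvRep old new l = new ++ pvRep old new (List.drop old.length l) := by
  match l with
  | [] => cases old <;> simp_all [List.isPrefixOf]
  | c :: t =>
    obtain ⟨m, hm⟩ : ∃ m, old.length = m + 1 := ⟨old.length - 1, by cases old <;> simp_all⟩
    rw [pvRep]
    simp [hp, hm, List.drop_succ_cons]

theorem pvRep_nomatch (old new : List Char) (c : Char) (t : List Char)
    (hp : ¬ old.isPrefixOf (c :: t) = true) :
    pvRep old new (c :: t) = c :: pvRep old new t := by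
  rw [pvRep]; simp [hp]

-- mismatch inside b at every offset ⇒ the scan of `b ++ x` walks straight through b
theorem pvRep_passthrough (old new b : List Char)
    (H : ∀ i, i < b.length → ∃ j, j < old.length ∧ i + j < b.length ∧ b[i+j]? ≠ old[j]?) :
    ∀ x, pvRep old new (b ++ x) = b ++ pvRep old new x := by
  induction b with
  | nil => intro x; simp
  | cons c b' ih =>
      intro x
      have hnp : ¬ old.isPrefixOf ((c :: b') ++ x) = true := by
        intro hp
        obtain ⟨j, hj, hjb, hne⟩ := H 0 (by simp)
        obtain ⟨r, hr⟩ := List.isPrefixOf_iff_prefix.mp hp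
        simp only [Nat.zero_add] at hjb hne
        apply hne
        have h1 : ((c :: b') ++ x)[j]? = (c :: b')[j]? :=
          List.getElem?_append_left hjb
        have h2 : ((c :: b') ++ x)[j]? = old[j]? := by
          rw [← hr, List.getElem?_append_left hj]
        rw [← h1, h2]
      have ih' := ih (by
        intro i hi
        obtain ⟨j, hj, hjb, hne⟩ := H (i + 1) (by simp; omega)
        refine ⟨j, hj, by simp at hjb ⊢; omega, ?_⟩
        have : (c :: b')[i + 1 + j]? = b'[i + j]? := by
          rw [Nat.add_right_comm i 1 j, List.getElem?_cons_succ]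
        rw [Nat.add_right_comm i 1 j] at hne
        rw [List.getElem?_cons_succ] at hne
        exact hne)
      rw [List.cons_append, pvRep_nomatch old new c (b' ++ x) hnp, ih' x]
      simp

-- the output of a scan is either the input or has a copy of `new` after a literal prefix of the input
theorem pvRep_decomp (old new : List Char) :
    ∀ l, pvRep old new l = l ∨
      ∃ p z, p ≤ l.length ∧ pvRep old new l = l.take p ++ new ++ z := by
  intro l
  induction l with
  | nil => left; simp [pvRep]
  | cons c t ih =>
      by_cases hp : old.isPrefixOf (c :: t) = true
      · right
        refine ⟨0, pvRep old new (List.drop (old.length - 1) t), by simp, ?_⟩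
        rw [pvRep]; simp [hp]
      · rw [pvRep_nomatch old new c t hp]
        rcases ih with h | ⟨p, z, hpl, hrep⟩
        · left; rw [h]
        · right
          exact ⟨p + 1, z, by simp; omega, by rw [hrep]; simp⟩

-- a scan with key `old` cannot create a new match of k' at the current position
theorem pvRep_noNew (old new k' : List Char)
    (Hq : ∀ q, 1 ≤ q → q < k'.length →
      ∃ j, j < new.length ∧ q + j < k'.length ∧ k'[q+j]? ≠ new[j]?)
    (c : Char) (t : List Char)
    (h : ¬ k'.isPrefixOf (c :: t) = true) :
    ¬ k'.isPrefixOf (c :: pvRep old new t) = true := by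
  intro hcon
  rcases pvRep_decomp old new t with heq | ⟨p, z, hpl, hrep⟩
  · rw [heq] at hcon; exact h hcon
  · rw [hrep] at hcon
    have hpre := List.isPrefixOf_iff_prefix.mp hcon
    by_cases hk : k'.length ≤ p + 1
    · match k', h, Hq, hpre, hk with
      | [], h, _, _, _ => exact h (by simp [List.isPrefixOf])
      | k0 :: ks, h, Hq, hpre, hk =>
        have hlen : ks.length ≤ p := by simpa using hk
        have htake : List.take (k0 :: ks).length (c :: (List.take p t ++ new ++ z)) =
            List.take (k0 :: ks).length (c :: t) := by
          simp only [List.length_cons, List.take_succ_cons]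
          congr 1
          rw [List.append_assoc, List.take_append_of_le_length (by simp; omega),
            List.take_take]
          congr 1
          omega
        apply h
        apply List.isPrefixOf_iff_prefix.mpr
        rw [List.prefix_iff_eq_take] at hpre ⊢
        rw [htake] at hpre
        exact hpre
    · have hk' : p + 1 < k'.length := Nat.lt_of_not_le hk
      obtain ⟨j, hj, hqj, hne⟩ := Hq (p + 1) (by omega) hk'
      obtain ⟨r, hr⟩ := hpre
      apply hne
      have h2 : (c :: (List.take p t ++ new ++ z))[p+1+j]? = k'[p+1+j]? := by
        rw [← hr, List.getElem?_append_left (by omega)]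
      have h3 : (c :: (List.take p t ++ new ++ z))[p+1+j]? = new[j]? := by
        have hlt : (List.take p t).length = p := by simp; omega
        have e1 : p + 1 + j = (p + j) + 1 := by omega
        rw [e1, List.getElem?_cons_succ, List.append_assoc,
          List.getElem?_append_right (by omega), hlt]
        rw [List.getElem?_append_left (by omega)]
        congr 1
        omega
      rw [← h2, h3]

theorem pvRep_match_append (old new x : List Char) (hold : old ≠ []) :
    pvRep old new (old ++ x) = new ++ pvRep old new x := by
  rw [pvRep_match old new _ hold (List.isPrefixOf_iff_prefix.mpr (List.prefix_append _ _))]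
  rw [List.drop_left]

theorem pvMain (n : Nat) : ∀ l : List Char, l.length ≤ n →
    pvRep pvK4 pvR4 (pvRep pvK3 pvR3 (pvRep pvK2 pvR2 (pvRep pvK1 pvR1 l))) = pvScan l := by
  induction n with
  | zero =>
      intro l hl
      have : l = [] := List.eq_nil_of_length_eq_zero (Nat.le_zero.mp hl)
      subst this
      simp [pvRep_nil, pvScan]
  | succ n ih =>
      intro l hl
      match l with
      | [] => simp [pvRep_nil, pvScan]
      | c :: t =>
        by_cases h1 : pvK1.isPrefixOf (c :: t) = true
        · obtain ⟨x, hx⟩ := List.isPrefixOf_iff_prefix.mp h1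
          have hxlen : x.length ≤ t.length := by
            have := congrArg List.length hx; simp [pvK1] at this; omega
          have hxt : x = List.drop 9 t := by
            have h' := congrArg (List.drop pvK1.length) hx
            rw [List.drop_left] at h'
            rw [h', show pvK1.length = 9 + 1 from by decide, List.drop_succ_cons]
          conv_rhs => rw [pvScan]
          simp only [h1, if_true]
          rw [← hx, pvRep_match_append pvK1 pvR1 x (by decide),
            pvRep_passthrough pvK2 pvR2 pvR1 (by decide),
            pvRep_passthrough pvK3 pvR3 pvR1 (by decide),
            pvRep_passthrough pvK4 pvR4 pvR1 (by decide),
            ih x (by simp at hl; omega), hxt]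
        · by_cases h2 : pvK2.isPrefixOf (c :: t) = true
          · obtain ⟨x, hx⟩ := List.isPrefixOf_iff_prefix.mp h2
            have hxlen : x.length ≤ t.length := by
              have := congrArg List.length hx; simp [pvK2] at this; omega
            have hxt : x = List.drop 8 t := by
              have h' := congrArg (List.drop pvK2.length) hx
              rw [List.drop_left] at h'
              rw [h', show pvK2.length = 8 + 1 from by decide, List.drop_succ_cons]
            conv_rhs => rw [pvScan]
            simp only [h1, h2, if_true, Bool.false_eq_true, if_false]
            rw [← hx,
              pvRep_passthrough pvK1 pvR1 pvK2 (by decide),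
              pvRep_match_append pvK2 pvR2 _ (by decide),
              pvRep_passthrough pvK3 pvR3 pvR2 (by decide),
              pvRep_passthrough pvK4 pvR4 pvR2 (by decide),
              ih x (by simp at hl; omega), hxt]
          · by_cases h3 : pvK3.isPrefixOf (c :: t) = true
            · obtain ⟨x, hx⟩ := List.isPrefixOf_iff_prefix.mp h3
              have hxlen : x.length ≤ t.length := by
                have := congrArg List.length hx; simp [pvK3] at this; omega
              have hxt : x = List.drop 8 t := by
                have h' := congrArg (List.drop pvK3.length) hx
                rw [List.drop_left] at h'
                rw [h', show pvK3.length = 8 + 1 from by decide, List.drop_succ_cons]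
              conv_rhs => rw [pvScan]
              simp only [h1, h2, h3, if_true, Bool.false_eq_true, if_false]
              rw [← hx,
                pvRep_passthrough pvK1 pvR1 pvK3 (by decide),
                pvRep_passthrough pvK2 pvR2 pvK3 (by decide),
                pvRep_match_append pvK3 pvR3 _ (by decide),
                pvRep_passthrough pvK4 pvR4 pvR3 (by decide),
                ih x (by simp at hl; omega), hxt]
            · by_cases h4 : pvK4.isPrefixOf (c :: t) = true
              · obtain ⟨x, hx⟩ := List.isPrefixOf_iff_prefix.mp h4
                have hxlen : x.length ≤ t.length := by
                  have := congrArg List.length hx; simp [pvK4] at this; omega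
                have hxt : x = List.drop 10 t := by
                  have h' := congrArg (List.drop pvK4.length) hx
                  rw [List.drop_left] at h'
                  rw [h', show pvK4.length = 10 + 1 from by decide, List.drop_succ_cons]
                conv_rhs => rw [pvScan]
                simp only [h1, h2, h3, h4, if_true, Bool.false_eq_true, if_false]
                rw [← hx,
                  pvRep_passthrough pvK1 pvR1 pvK4 (by decide),
                  pvRep_passthrough pvK2 pvR2 pvK4 (by decide),
                  pvRep_passthrough pvK3 pvR3 pvK4 (by decide),
                  pvRep_match_append pvK4 pvR4 _ (by decide),
                  ih x (by simp at hl; omega), hxt]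
              · have e1 := pvRep_nomatch pvK1 pvR1 c t h1
                have h2a := pvRep_noNew pvK1 pvR1 pvK2 (by decide) c t h2
                have e2 := pvRep_nomatch pvK2 pvR2 c (pvRep pvK1 pvR1 t) h2a
                have h3a := pvRep_noNew pvK1 pvR1 pvK3 (by decide) c t h3
                have h3b := pvRep_noNew pvK2 pvR2 pvK3 (by decide) c _ h3a
                have e3 := pvRep_nomatch pvK3 pvR3 c _ h3b
                have h4a := pvRep_noNew pvK1 pvR1 pvK4 (by decide) c t h4
                have h4b := pvRep_noNew pvK2 pvR2 pvK4 (by decide) c _ h4a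
                have h4c := pvRep_noNew pvK3 pvR3 pvK4 (by decide) c _ h4b
                have e4 := pvRep_nomatch pvK4 pvR4 c _ h4c
                rw [e1, e2, e3, e4, ih t (by simp at hl; omega)]
                conv_rhs => rw [pvScan]
                simp [h1, h2, h3, h4]

-- ===== VERDICT (by name: the statement is the Claim_ definition above) =====
theorem replace_imports_spec : Claim_equal_replace_imports := by
  intro content _
  unfold Spec_replace_imports replace_imports replace_imports_alt
  simp only [List.foldl, PySem.Str.replace, String.toList_ofList]
  congr 1
  rw [pvReplace_eq_pvRep _ _ _ (by decide), pvReplace_eq_pvRep _ _ _ (by decide),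
    pvReplace_eq_pvRep _ _ _ (by decide), pvReplace_eq_pvRep _ _ _ (by decide)]
  exact pvMain content.toList.length content.toList (le_refl _)
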